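-- pv_equiv track=rewrite | github.com/Briggsby/AdventOfCode | 2019/2019_4.py | part2_combination_checker
-- ===== SOURCE A (Python) =====
-- def part2_combination_checker(number):
--     prev_char = 0
--     adjacency = False
--     chain = False
--     for i in range(len(str(number))):
--         char = str(number)[i]
--         if int(char) < int(prev_char):
--             return False
--         if char == prev_char:
--             if not chain:
--                 next_char = str(number)[i+1] if i+1 < len(str(number)) else None
--                 if next_char == char:
--                     chain = True
--                 else:
--                     adjacency = True
--         elif chain:
--             chain = False
--         prev_char = char
--     return adjacency
-- ===== SOURCE B (Python) =====
-- def part2_combination_checker(number):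
--     s = str(number)
--     prev = 0
--     for ch in s:
--         d = int(ch)
--         if d < prev:
--             return False
--         prev = d
--     run = 1
--     for i in range(1, len(s)):
--         if s[i] == s[i - 1]:
--             run += 1
--         else:
--             if run == 2:
--                 return True
--             run = 1
--     return run == 2
-- ===== Notes on version B (the rewrite author's own statement) =====
-- stated objective: simpler
-- what changed: Replaced A's one-loop lookahead state machine (adjacency/chain flags with s[i+1] peeking and repeated str(number) calls) by two plain passes: a non-decreasing digit scan, then a run-length count returning True when some maximal run has length exactly 2.
-- outside the precondition, e.g. on part2_combination_checker(-12): A raises ValueError, B raises ValueError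
import Mathlib
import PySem

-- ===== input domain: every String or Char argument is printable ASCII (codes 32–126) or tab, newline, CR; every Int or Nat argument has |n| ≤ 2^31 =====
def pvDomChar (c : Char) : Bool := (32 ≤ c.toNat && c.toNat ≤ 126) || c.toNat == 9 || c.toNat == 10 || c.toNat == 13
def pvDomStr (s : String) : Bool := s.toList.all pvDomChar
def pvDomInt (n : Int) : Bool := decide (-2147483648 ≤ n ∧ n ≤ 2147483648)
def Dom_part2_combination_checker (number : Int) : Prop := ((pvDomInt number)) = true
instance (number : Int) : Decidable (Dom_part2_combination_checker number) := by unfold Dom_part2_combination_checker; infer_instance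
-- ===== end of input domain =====

-- B replaces A's adjacency/chain lookahead state machine with a non-decreasing scan
-- followed by a run-length counting pass (objective: simpler).

-- ===== PORT A =====
-- int(char) for a single digit char (exact on Pre_, where str(number) consists of digits)
def pvCharVal (c : Char) : Int := (c.toNat : Int) - 48

-- int(prev_char): prev_char starts as the int 0, afterwards is a one-char string
def pvPrevVal : Option Char → Int
  | none => 0
  | some c => pvCharVal c

-- char == prev_char: a string never equals the initial int 0
def pvEqPrev (c : Char) : Option Char → Bool
  | none => false
  | some p => c == p

def pvLoopA : List Char → Option Char → Bool → Bool → Bool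
  | [], _, adj, _ => adj
  | c :: rest, prev, adj, chain =>
    if pvCharVal c < pvPrevVal prev then false
    else if pvEqPrev c prev then
      if !chain then
        -- next_char == char (None == char is False)
        if rest.head? == some c then pvLoopA rest (some c) adj true
        else pvLoopA rest (some c) true chain
      else pvLoopA rest (some c) adj chain
    else if chain then pvLoopA rest (some c) adj false
    else pvLoopA rest (some c) adj chain

def part2_combination_checker (number : Int) : Bool :=
  pvLoopA (PySem.Int.toStr number).toList none false false

-- ===== PORT B =====
-- first pass: each digit compared with the previous digit value
def pvNd : List Char → Int → Bool
  | [], _ => true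
  | c :: rest, prev => if pvCharVal c < prev then false else pvNd rest (pvCharVal c)

-- second pass: run-length counting (p = previous char, run = current run length)
def pvGo (p : Char) (run : Int) : List Char → Bool
  | [] => run == 2
  | c :: rest =>
    if c == p then pvGo c (run + 1) rest
    else if run == 2 then true
    else pvGo c 1 rest

def part2_combination_checker_alt (number : Int) : Bool :=
  let s := (PySem.Int.toStr number).toList
  if pvNd s 0 then
    match s with
    | [] => false
    | c :: rest => pvGo c 1 rest
  else false

-- ===== PRECONDITION & SPEC =====
-- A raises ValueError (int('-')) on negative numbers, so they lie outside Pre_ (B raises there too).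
def Pre_part2_combination_checker (number : Int) : Prop := 0 ≤ number
instance (number : Int) : Decidable (Pre_part2_combination_checker number) := by
  unfold Pre_part2_combination_checker; infer_instance

def pvWitness_part2_combination_checker : Int := (122)

def Spec_part2_combination_checker (number : Int) (out : Bool) : Prop := out = part2_combination_checker_alt number
instance (number : Int) (out : Bool) : Decidable (Spec_part2_combination_checker number out) := by unfold Spec_part2_combination_checker; infer_instance

-- ===== CLAIM (what is proved, stated in full; the proofs are below) =====
def Claim_equal_part2_combination_checker : Prop := ∀ (number : Int), Dom_part2_combination_checker number → Pre_part2_combination_checker number → Spec_part2_combination_checker number (part2_combination_checker number)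

-- ===== LEMMAS AND PROOFS =====

-- closed form of A's adjacency/chain bookkeeping, with the monotonicity check factored out
def pvH : List Char → Option Char → Bool → Bool
  | [], _, _ => false
  | c :: r, prev, chain =>
    if pvEqPrev c prev then
      if chain then pvH r (some c) true
      else if r.head? == some c then pvH r (some c) true
      else true
    else pvH r (some c) false

theorem pvLoopA_closed (s : List Char) : ∀ (prev : Option Char) (adj chain : Bool),
    pvLoopA s prev adj chain = (pvNd s (pvPrevVal prev) && (adj || pvH s prev chain)) := by
  induction s with
  | nil => intro prev adj chain; simp [pvLoopA, pvNd, pvH]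
  | cons c r ih =>
    intro prev adj chain
    simp only [pvLoopA, pvNd, pvH]
    by_cases hlt : pvCharVal c < pvPrevVal prev
    · simp [hlt]
    · by_cases heq : pvEqPrev c prev = true
      · cases chain with
        | false =>
          by_cases hnext : r.head? == some c
          · simp [heq, hnext, ih, pvPrevVal, Bool.and_assoc]; rfl
          · simp [heq, hnext, ih, pvPrevVal]; rfl
        | true => simp [heq, ih, pvPrevVal, Bool.and_assoc]; rfl
      · cases chain with
        | false => simp [heq, ih, pvPrevVal, Bool.and_assoc]; rfl
        | true => simp [heq, ih, pvPrevVal, Bool.and_assoc]; rfl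

theorem pvH_go (r : List Char) : ∀ (c : Char) (n : Int) (chain : Bool),
    (chain = false → n = 1) →
    (chain = true → 3 ≤ n ∨ (n = 2 ∧ r.head? = some c)) →
    pvH r (some c) chain = pvGo c n r := by
  induction r with
  | nil =>
    intro c n chain h0 h1
    cases chain with
    | false => simp [pvH, pvGo, h0 rfl]
    | true =>
      rcases h1 rfl with h | ⟨_, h⟩
      · have : ¬ (n = 2) := by omega
        simp [pvH, pvGo, this]
      · simp at h
  | cons d r' ih =>
    intro c n chain h0 h1
    by_cases hdc : d = c
    · subst hdc
      cases chain with
      | true =>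
        have h3 : 3 ≤ n + 1 := by
          rcases h1 rfl with h | ⟨h, _⟩ <;> omega
        simp only [pvH, pvGo, pvEqPrev, beq_self_eq_true, if_true]
        exact ih d (n + 1) true (by simp) (fun _ => Or.inl h3)
      | false =>
        have hn1 : n = 1 := h0 rfl
        subst hn1
        simp only [pvH, pvGo, pvEqPrev, beq_self_eq_true, if_true]
        by_cases hnext : r'.head? = some d
        · have : (r'.head? == some d) = true := by simp [hnext]
          rw [this]
          simp only [if_true]
          exact ih d 2 true (by simp) (fun _ => Or.inr ⟨rfl, hnext⟩)
        · have hb : (r'.head? == some d) = false := by simp [hnext]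
          rw [hb]
          simp only [Bool.false_eq_true, if_false]
          cases r' with
          | nil => simp [pvGo]
          | cons e r'' =>
            have hed : ¬ (e = d) := by intro h; apply hnext; simp [h]
            have : (e == d) = false := by simp [hed]
            simp [pvGo, this]
    · have hne : ¬ (pvEqPrev d (some c) = true) := by simp [pvEqPrev, hdc]
      have hn2 : ¬ (n = 2) := by
        cases chain with
        | false => have := h0 rfl; omega
        | true =>
          rcases h1 rfl with h | ⟨_, h⟩
          · omega
          · simp at h; exact absurd h hdc
      have hd : (d == c) = false := by simp [hdc]
      cases chain with
      | false =>
        simp only [pvH, pvGo]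
        rw [if_neg hne, if_neg (by simp [hdc]), if_neg (by simp [hn2])]
        exact ih d 1 false (fun _ => rfl) (by simp)
      | true =>
        simp only [pvH, pvGo]
        rw [if_neg (by simp [pvEqPrev, hdc]), if_neg (by simp [hdc]), if_neg (by simp [hn2])]
        exact ih d 1 false (fun _ => rfl) (by simp)

-- ===== VERDICT (by name: the statement is the Claim_ definition above) =====
theorem part2_combination_checker_spec : Claim_equal_part2_combination_checker := by
  intro number _ _
  unfold Spec_part2_combination_checker part2_combination_checker part2_combination_checker_alt
  rw [pvLoopA_closed]
  cases h : (PySem.Int.toStr number).toList with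
  | nil => simp [pvNd, pvH]
  | cons c r =>
    simp only [pvPrevVal, Bool.false_or]
    have hh : pvH (c :: r) none false = pvGo c 1 r := by
      simp only [pvH, pvEqPrev, Bool.false_eq_true, if_false]
      exact pvH_go r c 1 false (fun _ => rfl) (by simp)
    rw [hh]
    cases hnd : pvNd (c :: r) 0 <;> simp
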